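-- pv_equiv track=rewrite | github.com/azizabacc/Scrabble | compte_points.py | compte_points
-- ===== SOURCE A (Python) =====
-- def compte_points(mot, points_lettres):
--     i=0
--     score=0
--     while i <len(mot):
--         point=points_lettres.get(mot[i])
--         score+=point
--         i+=1
--     return score
-- ===== SOURCE B (Python) =====
-- def compte_points(mot, points_lettres):
--     # Recursive decomposition: the score of a word is the value of its first
--     # letter plus the score of the remaining letters; empty word scores 0.
--     if mot == "":
--         return 0
--     return points_lettres.get(mot[0]) + compte_points(mot[1:], points_lettres)
-- ===== Notes on version B (the rewrite author's own statement) =====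
-- stated objective: alternative
-- what changed: B replaces A's index-driven while loop with an accumulator by a direct structural recursion on the word (value of the first letter plus the score of the rest), with no index variable and no mutable accumulator.
import Mathlib
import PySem

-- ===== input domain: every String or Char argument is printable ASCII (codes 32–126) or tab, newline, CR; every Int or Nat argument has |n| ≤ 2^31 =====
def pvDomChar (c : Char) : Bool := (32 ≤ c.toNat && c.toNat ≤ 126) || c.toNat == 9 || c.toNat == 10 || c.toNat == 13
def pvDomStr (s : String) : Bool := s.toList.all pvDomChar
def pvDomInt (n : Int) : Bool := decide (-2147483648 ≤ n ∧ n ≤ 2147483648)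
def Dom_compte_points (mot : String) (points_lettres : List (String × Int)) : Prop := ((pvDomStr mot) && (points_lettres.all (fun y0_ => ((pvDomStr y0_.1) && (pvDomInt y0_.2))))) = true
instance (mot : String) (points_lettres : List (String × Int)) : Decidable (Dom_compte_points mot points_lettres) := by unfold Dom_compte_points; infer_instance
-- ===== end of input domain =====

-- B replaces A's index-driven while loop with a direct structural recursion on
-- the word (first letter's value + score of the rest); objective: alternative.

-- ===== PORT A =====
-- 'i=0; score=0; while i < len(mot): point = points_lettres.get(mot[i]); score += point; i += 1'
-- ported as a fold of the loop body over the index range 0..len(mot).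
-- The index i is always in range, so 'mot[i]' is ported with pyGetD (default never taken).
-- Under Pre_ every letter is a key, so .get never returns None and the '.getD 0'
-- default is never taken (outside Pre_ the Python raises TypeError on 'score += None').
def compte_points (mot : String) (points_lettres : List (String × Int)) : Int :=
  (PySem.List.pyRange 0 (PySem.Str.len mot) 1).foldl
    (fun score i =>
      score + ((PySem.Dict.mk points_lettres).get?
        (PySem.List.pyGetD mot.toList i ' ').toString).getD 0) 0

-- ===== PORT B =====
-- 'if mot == "": return 0; return points_lettres.get(mot[0]) + compte_points(mot[1:], ...)'
-- structural recursion on the word's characters; same remark about '.getD 0' under Pre_.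
def compte_points_go (points_lettres : List (String × Int)) : List Char → Int
  | [] => 0
  | c :: rest =>
      ((PySem.Dict.mk points_lettres).get? c.toString).getD 0
        + compte_points_go points_lettres rest

def compte_points_alt (mot : String) (points_lettres : List (String × Int)) : Int :=
  compte_points_go points_lettres mot.toList

-- ===== PRECONDITION & SPEC =====
-- Pre_: every letter of the word is a key of the dict; on any other input both
-- Pythons raise TypeError (None added to an int), so those inputs are excluded.
def Pre_compte_points (mot : String) (points_lettres : List (String × Int)) : Prop :=
  (mot.toList.all (fun c => points_lettres.any (fun p => p.1 == c.toString))) = true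
instance (mot : String) (points_lettres : List (String × Int)) : Decidable (Pre_compte_points mot points_lettres) := by unfold Pre_compte_points; infer_instance
def pvWitness_compte_points : String × (List (String × Int)) := ("abca", [("a", 1), ("b", 3), ("c", 3)])

def Spec_compte_points (mot : String) (points_lettres : List (String × Int)) (out : Int) : Prop := out = compte_points_alt mot points_lettres
instance (mot : String) (points_lettres : List (String × Int)) (out : Int) : Decidable (Spec_compte_points mot points_lettres out) := by unfold Spec_compte_points; infer_instance

-- ===== CLAIM (what is proved, stated in full; the proofs are below) =====
def Claim_equal_compte_points : Prop := ∀ (mot : String) (points_lettres : List (String × Int)), Dom_compte_points mot points_lettres → Pre_compte_points mot points_lettres → Spec_compte_points mot points_lettres (compte_points mot points_lettres)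

-- ===== LEMMAS AND PROOFS =====

-- B's recursion computes the plain sum of the letters' values
lemma compte_points_go_eq_sum (pl : List (String × Int)) (l : List Char) :
    compte_points_go pl l
      = (l.map (fun c => ((PySem.Dict.mk pl).get? c.toString).getD 0)).sum := by
  induction l with
  | nil => simp [compte_points_go]
  | cons c t ih => simp [compte_points_go, ih]

theorem compte_points_spec : Claim_equal_compte_points := by
  intro mot points_lettres _ _
  unfold Spec_compte_points compte_points compte_points_alt
  set g : Char → Int := fun c => ((PySem.Dict.mk points_lettres).get? c.toString).getD 0 with hg
  -- A: the index fold over range(len(mot)) is the fold over the characters …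
  have hA : (PySem.List.pyRange 0 (PySem.Str.len mot) 1).foldl
      (fun score i => score + g (PySem.List.pyGetD mot.toList i ' ')) 0
      = mot.toList.foldl (fun score c => score + g c) 0 := by
    have := PySem.List.foldl_pyRange_zero_pyGetD' mot.toList ' '
      (fun (score : Int) c => score + g c) 0
    simpa [PySem.Str.len_eq] using this
  -- … which is the plain sum, i.e. B's recursion.
  rw [hA, PySem.List.foldl_add, compte_points_go_eq_sum]
  simp [hg]
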